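-- pv_equiv track=rewrite | github.com/chronick/duopulse | scripts/pattern-viz-debug/src/pattern_viz/output.py | format_mask_binary
-- ===== SOURCE A (Python) =====
-- def format_mask_binary(mask: int, length: int = 32) -> str:
--     """Format mask as binary string with markers."""
--     chars = []
--     for i in range(length):
--         if mask & (1 << i):
--             chars.append("X")
--         else:
--             chars.append(".")
--     return "".join(chars)
-- ===== SOURCE B (Python) =====
-- def format_mask_binary(mask: int, length: int = 32) -> str:
--     """Format mask as binary string with markers."""
--     if length <= 0:
--         return ""
--     masked = mask & ((1 << length) - 1)
--     s = format(masked, "b").zfill(length)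
--     return s[::-1].translate(str.maketrans("01", ".X"))
-- ===== Notes on version B (the rewrite author's own statement) =====
-- stated objective: faster
-- what changed: Replaces the per-bit mask-and-append Python loop with a single masked binary-string construction (mask & ((1<<length)-1), format(...,'b').zfill(length)) that is reversed and mapped to markers via str.translate.
import Mathlib
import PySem

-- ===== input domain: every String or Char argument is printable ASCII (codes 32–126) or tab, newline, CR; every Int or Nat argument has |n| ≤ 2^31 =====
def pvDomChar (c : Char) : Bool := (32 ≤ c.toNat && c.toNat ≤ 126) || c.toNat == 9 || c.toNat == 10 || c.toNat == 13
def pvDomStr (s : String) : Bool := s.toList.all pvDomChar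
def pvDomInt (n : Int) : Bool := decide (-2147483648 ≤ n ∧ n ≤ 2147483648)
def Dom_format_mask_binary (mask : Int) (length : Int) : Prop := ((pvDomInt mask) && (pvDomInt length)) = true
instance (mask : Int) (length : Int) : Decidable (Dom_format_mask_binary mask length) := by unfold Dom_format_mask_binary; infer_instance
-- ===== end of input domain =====

-- B replaces A's per-bit mask-and-append loop by one masked binary-string construction
-- (mask & ((1<<length)-1), format(...,'b').zfill(length), reverse, translate); measured faster.

-- ===== PORT A =====
-- Python A: for i in range(length): append "X" if mask & (1 << i) else "."; "".join
def format_mask_binary (mask : Int) (length : Int) : String :=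
  PySem.Str.join ""
    ((PySem.List.pyRange 0 length 1).foldl
      (fun chars i =>
        if PySem.Int.band mask ((1 : Int) <<< (i.toNat : Int)) ≠ 0 then chars ++ ["X"]
        else chars ++ ["."]) [])

-- ===== PORT B =====
-- str.maketrans("01", ".X") / str.translate as a per-character table
def pvTrans (c : Char) : Char := if c = '0' then '.' else if c = '1' then 'X' else c

def format_mask_binary_alt (mask : Int) (length : Int) : String :=
  if length ≤ 0 then ""
  else
    String.ofList
      (((PySem.Chars.zfill
          (PySem.Int.toBinChars
            (PySem.Int.band mask (((1 : Int) <<< (length.toNat : Int)) - 1)))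
          length).reverse).map pvTrans)

-- ===== PRECONDITION & SPEC =====
def Spec_format_mask_binary (mask : Int) (length : Int) (out : String) : Prop := out = format_mask_binary_alt mask length
instance (mask : Int) (length : Int) (out : String) : Decidable (Spec_format_mask_binary mask length out) := by unfold Spec_format_mask_binary; infer_instance

-- ===== CLAIM (what is proved, stated in full; the proofs are below) =====
def Claim_equal_format_mask_binary : Prop := ∀ (mask : Int) (length : Int), Dom_format_mask_binary mask length → Spec_format_mask_binary mask length (format_mask_binary mask length)

-- ===== LEMMAS AND PROOFS =====

-- format(n,'b') digits (MSB first) of a natural number, as structural recursion on halving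
def repBin (n : Nat) : List Char :=
  if _h : n < 2 then [Nat.digitChar n]
  else repBin (n / 2) ++ [Nat.digitChar (n % 2)]
decreasing_by exact Nat.div_lt_self (by omega) (by omega)

theorem toDigitsCore_eq_repBin : ∀ (f n : Nat) (acc : List Char), n < f →
    Nat.toDigitsCore 2 f n acc = repBin n ++ acc := by
  intro f
  induction f with
  | zero => omega
  | succ f ih =>
    intro n acc hn
    rw [Nat.toDigitsCore]
    by_cases h2 : n < 2
    · have hd : n / 2 = 0 := by omega
      rw [repBin]
      simp [hd, h2]
      have : n % 2 = n := by omega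
      rw [this]
    · have hd : ¬ n / 2 = 0 := by omega
      simp only [hd, if_false]
      rw [ih (n / 2) _ (by omega)]
      conv_rhs => rw [repBin]
      simp [h2]

theorem toDigits_eq_repBin (n : Nat) : Nat.toDigits 2 n = repBin n := by
  rw [Nat.toDigits, toDigitsCore_eq_repBin (n + 1) n [] (by omega)]
  simp

theorem repBin_lt_two_pow (n : Nat) : n < 2 ^ (repBin n).length := by
  induction n using Nat.strong_induction_on with
  | _ n ih =>
    rw [repBin]
    by_cases h2 : n < 2
    · simpa [h2] using h2
    · have := ih (n / 2) (Nat.div_lt_self (by omega) (by omega))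
      simp only [h2, dif_neg, not_false_iff, List.length_append, List.length_singleton]
      rw [pow_succ]
      omega

theorem repBin_length_le {n L : Nat} (hL : 1 ≤ L) (h : n < 2 ^ L) : (repBin n).length ≤ L := by
  induction n using Nat.strong_induction_on generalizing L with
  | _ n ih =>
    rw [repBin]
    by_cases h2 : n < 2
    · simpa [h2] using hL
    · have hL2 : 2 ≤ L := by
        by_contra hc
        interval_cases L <;> omega
      have := ih (n / 2) (Nat.div_lt_self (by omega) (by omega)) (L := L - 1)
        (by omega) (by
          have : 2 ^ L = 2 * 2 ^ (L - 1) := by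
            rw [← pow_succ']
            congr 1
            omega
          omega)
      simp only [h2, dif_neg, not_false_iff, List.length_append, List.length_singleton]
      omega

theorem repBin_head (n : Nat) : ∃ t, repBin n = '0' :: t ∨ repBin n = '1' :: t := by
  induction n using Nat.strong_induction_on with
  | _ n ih =>
    rw [repBin]
    by_cases h2 : n < 2
    · refine ⟨[], ?_⟩
      interval_cases n <;> simp [Nat.digitChar]
    · obtain ⟨t, ht⟩ := ih (n / 2) (Nat.div_lt_self (by omega) (by omega))
      simp only [h2, dif_neg, not_false_iff]
      rcases ht with h | h <;> rw [h]
      · exact ⟨t ++ [Nat.digitChar (n % 2)], Or.inl rfl⟩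
      · exact ⟨t ++ [Nat.digitChar (n % 2)], Or.inr rfl⟩

def pvBitChar (v k : Nat) : Char := if v.testBit k then '1' else '0'

theorem repBin_reverse (n : Nat) :
    (repBin n).reverse = (List.range (repBin n).length).map (pvBitChar n) := by
  induction n using Nat.strong_induction_on with
  | _ n ih =>
    rw [repBin]
    by_cases h2 : n < 2
    · simp only [h2, dif_pos, List.reverse_singleton, List.length_singleton, List.range_one,
        List.map_cons, List.map_nil]
      interval_cases n <;> simp [pvBitChar, Nat.digitChar, Nat.testBit_zero]
    · have := ih (n / 2) (Nat.div_lt_self (by omega) (by omega))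
      simp only [h2, dif_neg, not_false_iff, List.reverse_append, List.reverse_singleton,
        List.length_append, List.length_singleton, List.singleton_append]
      rw [List.range_succ_eq_map, List.map_cons, this]
      congr 1
      · have h01 : n % 2 = 0 ∨ n % 2 = 1 := by omega
        rcases h01 with h | h <;> simp [pvBitChar, h, Nat.testBit_zero, Nat.digitChar]
      · rw [List.map_map]
        apply List.map_congr_left
        intro k _
        simp [pvBitChar, Nat.testBit_succ]

theorem zfill_eq {cs : List Char} {c : Char} {t : List Char} (L : Nat)
    (hcs : cs = c :: t) (hc : c = '0' ∨ c = '1') (hlen : cs.length ≤ L) :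
    PySem.Chars.zfill cs (L : Int) = List.replicate (L - cs.length) '0' ++ cs := by
  unfold PySem.Chars.zfill
  by_cases hle : (L : Int) ≤ cs.length
  · have : L = cs.length := by omega
    simp [hle, this]
  · subst hcs
    have hsign : ¬ (c = '+' ∨ c = '-') := by
      rcases hc with h | h <;> subst h <;> decide
    simp only [hle, if_false, hsign]
    simp

theorem padded_reverse {v L : Nat} (hL : 1 ≤ L) (hv : v < 2 ^ L) :
    (List.replicate (L - (repBin v).length) '0' ++ repBin v).reverse =
      (List.range L).map (pvBitChar v) := by
  have hlen := repBin_length_le hL hv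
  have hlt := repBin_lt_two_pow v
  rw [List.reverse_append, repBin_reverse, List.reverse_replicate]
  have hsplit : L = (repBin v).length + (L - (repBin v).length) := by omega
  conv_rhs => rw [hsplit, List.range_add, List.map_append]
  congr 1
  rw [List.map_map]
  symm
  rw [List.eq_replicate_iff]
  refine ⟨by simp, ?_⟩
  intro b hb
  simp only [List.mem_map, Function.comp] at hb
  obtain ⟨j, _, hj⟩ := hb
  rw [← hj]
  have : v.testBit ((repBin v).length + j) = false := by
    apply Nat.testBit_eq_false_of_lt
    calc v < 2 ^ (repBin v).length := hlt
    _ ≤ 2 ^ ((repBin v).length + j) := Nat.pow_le_pow_right (by omega) (by omega)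
  simp [pvBitChar, this]

theorem pv_sub_and : ∀ n m : Nat, n - (n &&& m) = Nat.ldiff n m := by
  intro n
  induction n using Nat.binaryRec with
  | zero => intro m; simp [Nat.ldiff]
  | bit b n ih =>
    intro m
    rw [← Nat.bit_testBit_zero_shiftRight_one m, Nat.land_bit, Nat.ldiff_bit]
    have h1 := ih (m >>> 1)
    have h2 : n &&& (m >>> 1) ≤ n := Nat.and_le_left
    cases b <;> cases m.testBit 0 <;>
      simp only [Nat.bit_val, Bool.toNat, Bool.and_true, Bool.and_false, Bool.not_true,
        Bool.not_false, cond_true, cond_false] <;> omega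

theorem shl_cast (k : Nat) : ((1 : Int) <<< (k : Int)) = ((2 ^ k : Nat) : Int) :=
  Int.one_shiftLeft k

theorem shl_sub_one_cast (k : Nat) : ((1 : Int) <<< (k : Int)) - 1 = ((2 ^ k - 1 : Nat) : Int) := by
  rw [shl_cast]
  have : 1 ≤ 2 ^ k := Nat.one_le_two_pow
  omega

-- band with a negative left argument and a nonnegative right argument, unfolded
theorem band_neg_nonneg (a b : Int) (ha : ¬ 0 ≤ a) (hb : 0 ≤ b) :
    PySem.Int.band a b = ((b.toNat - (b.toNat &&& (-a - 1).toNat) : Nat) : Int) := by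
  rw [PySem.Int.band]
  simp [ha, hb]

theorem bit_iff (mask : Int) (L k : Nat) (hk : k < L) :
    (PySem.Int.band mask ((1 : Int) <<< (k : Int)) ≠ 0) ↔
      (PySem.Int.band mask (((1 : Int) <<< (L : Int)) - 1)).toNat.testBit k := by
  rw [shl_cast, shl_sub_one_cast]
  by_cases hm : 0 ≤ mask
  · rw [PySem.Int.band_of_nonneg hm (by positivity), PySem.Int.band_of_nonneg hm (by omega)]
    simp only [Int.toNat_natCast]
    rw [Nat.and_two_pow, Nat.testBit_land, Nat.testBit_two_pow_sub_one]
    constructor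
    · intro h
      have : mask.toNat.testBit k = true := by
        by_contra hc
        simp only [Bool.not_eq_true] at hc
        simp [hc] at h
      simp [this, hk]
    · intro h
      simp only [Bool.and_eq_true, decide_eq_true_eq] at h
      simp [h.1]
  · rw [band_neg_nonneg mask _ hm (by positivity), band_neg_nonneg mask _ hm (by omega)]
    set m := (-mask - 1).toNat with hm'
    simp only [Int.toNat_natCast]
    rw [pv_sub_and, pv_sub_and]
    have hldk : ∀ j, (Nat.ldiff (2 ^ k) m).testBit j = ((2 ^ k).testBit j && ! m.testBit j) :=
      fun j => Nat.testBit_ldiff _ _ _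
    rw [Nat.testBit_ldiff, Nat.testBit_two_pow_sub_one]
    simp only [hk, decide_true, Bool.true_and]
    constructor
    · intro h
      by_contra hc
      simp only [Bool.not_eq_true] at hc
      apply h
      have hz : Nat.ldiff (2 ^ k) m = 0 := by
        apply Nat.zero_of_testBit_eq_false
        intro j
        rw [hldk j]
        by_cases hj : k = j
        · subst hj; simp [Nat.testBit_two_pow_self, hc]
        · simp [Nat.testBit_two_pow_of_ne hj]
      rw [hz]
      simp
    · intro h hz
      have hbit : (Nat.ldiff (2 ^ k) m).testBit k = true := by
        rw [hldk k]
        simp [Nat.testBit_two_pow_self, h]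
      have hnz : Nat.ldiff (2 ^ k) m ≠ 0 := by
        intro h0
        rw [h0] at hbit
        simp at hbit
      apply hnz
      exact_mod_cast hz

theorem masked_nonneg (mask : Int) (L : Nat) :
    0 ≤ PySem.Int.band mask (((1 : Int) <<< (L : Int)) - 1) := by
  rw [PySem.Int.band_comm]
  exact PySem.Int.band_nonneg_of_nonneg_left mask (by rw [shl_sub_one_cast]; positivity)

theorem masked_lt (mask : Int) (L : Nat) :
    (PySem.Int.band mask (((1 : Int) <<< (L : Int)) - 1)).toNat < 2 ^ L := by
  rw [shl_sub_one_cast]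
  have h1 : 1 ≤ 2 ^ L := Nat.one_le_two_pow
  by_cases hm : 0 ≤ mask
  · rw [PySem.Int.band_of_nonneg hm (by omega)]
    simp only [Int.toNat_natCast]
    have := Nat.and_le_right (n := mask.toNat) (m := 2 ^ L - 1)
    omega
  · rw [band_neg_nonneg mask _ hm (by omega)]
    simp only [Int.toNat_natCast]
    omega

def pvItem (mask i : Int) : String :=
  if PySem.Int.band mask ((1 : Int) <<< (i.toNat : Int)) ≠ 0 then "X" else "."

def pvChar (mask : Int) (k : Nat) : Char :=
  if PySem.Int.band mask ((1 : Int) <<< ((k : Nat) : Int)) ≠ 0 then 'X' else '.'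

theorem fold_eq (mask : Int) (l : List Int) : ∀ (acc : List String),
    l.foldl (fun chars i =>
      if PySem.Int.band mask ((1 : Int) <<< (i.toNat : Int)) ≠ 0 then chars ++ ["X"]
      else chars ++ ["."]) acc = acc ++ l.map (pvItem mask) := by
  induction l with
  | nil => intro acc; simp
  | cons x xs ih =>
    intro acc
    rw [List.foldl_cons, List.map_cons, ih]
    by_cases hc : PySem.Int.band mask ((1 : Int) <<< (x.toNat : Int)) ≠ 0
    · rw [if_pos hc, show pvItem mask x = "X" from by rw [pvItem, if_pos hc]]
      simp
    · rw [if_neg hc, show pvItem mask x = "." from by rw [pvItem, if_neg hc]]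
      simp

theorem item_toList (mask : Int) (k : Nat) :
    (pvItem mask ((k : Nat) : Int)).toList = [pvChar mask k] := by
  rw [pvItem, pvChar, Int.toNat_natCast]
  split <;> rfl

theorem A_toList (mask : Int) (L : Nat) :
    (format_mask_binary mask (L : Int)).toList = (List.range L).map (pvChar mask) := by
  unfold format_mask_binary
  rw [fold_eq, List.nil_append, PySem.Str.toList_join, List.map_map,
    PySem.List.pyRange_zero_natCast, List.map_map]
  have hmap : (List.range L).map ((String.toList ∘ pvItem mask) ∘ fun (k : Nat) => (k : Int)) =
      ((List.range L).map (pvChar mask)).map (fun c => [c]) := by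
    rw [List.map_map]
    apply List.map_congr_left
    intro k _
    simp only [Function.comp]
    exact item_toList mask k
  rw [hmap]
  have hsep : ("" : String).toList = [] := rfl
  rw [hsep, PySem.Chars.join_nil_singletons]

theorem main_eq (mask length : Int) :
    format_mask_binary mask length = format_mask_binary_alt mask length := by
  by_cases hl : length ≤ 0
  · have hnot : ¬ (0 : Int) < length := by omega
    unfold format_mask_binary format_mask_binary_alt
    simp only [hl, if_pos]
    rw [PySem.List.pyRange]
    simp [hnot]
    rfl
  · have hL : 1 ≤ length.toNat := by omega
    have hcast : ((length.toNat : Nat) : Int) = length := Int.toNat_of_nonneg (by omega)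
    set L := length.toNat with hLdef
    rw [← hcast]
    have hnonneg := masked_nonneg mask L
    have hvlt := masked_lt mask L
    set masked := PySem.Int.band mask (((1 : Int) <<< (L : Int)) - 1) with hmdef
    set v := masked.toNat with hvdef
    have halt : format_mask_binary_alt mask (L : Int) =
        String.ofList (((List.replicate (L - (repBin v).length) '0' ++ repBin v).reverse).map
          pvTrans) := by
      unfold format_mask_binary_alt
      have h1 : ¬ ((L : Int) ≤ 0) := by omega
      simp only [h1, if_false, Int.toNat_natCast]
      have h2 : PySem.Int.toBinChars masked = repBin v := by
        rw [PySem.Int.toBinChars]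
        have hneg : ¬ masked < 0 := by omega
        simp only [hneg, if_false]
        rw [← toDigits_eq_repBin]
      rw [← hmdef, h2]
      obtain ⟨t, ht⟩ := repBin_head v
      have hlen : (repBin v).length ≤ L := repBin_length_le hL hvlt
      rcases ht with ht | ht
      · rw [zfill_eq L ht (Or.inl rfl) hlen]
      · rw [zfill_eq L ht (Or.inr rfl) hlen]
    rw [halt, padded_reverse hL hvlt, List.map_map]
    have htl : (format_mask_binary mask (L : Int)).toList =
        (List.range L).map (pvTrans ∘ pvBitChar v) := by
      rw [A_toList]
      apply List.map_congr_left
      intro k hk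
      have hklt : k < L := List.mem_range.mp hk
      by_cases hb : v.testBit k
      · have hc : PySem.Int.band mask ((1 : Int) <<< ((k : Nat) : Int)) ≠ 0 :=
          (bit_iff mask L k hklt).mpr hb
        simp [pvChar, hc, Function.comp, pvTrans, pvBitChar, hb]
      · have hc : ¬ (PySem.Int.band mask ((1 : Int) <<< ((k : Nat) : Int)) ≠ 0) := by
          intro hc
          exact hb ((bit_iff mask L k hklt).mp hc)
        simp [pvChar, hc, Function.comp, pvTrans, pvBitChar, hb]
    calc format_mask_binary mask (L : Int)
        = String.ofList ((format_mask_binary mask (L : Int)).toList) := by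
          rw [String.ofList_toList]
      _ = String.ofList ((List.range L).map (pvTrans ∘ pvBitChar v)) := by rw [htl]

-- ===== VERDICT (by name: the statement is the Claim_ definition above) =====
theorem format_mask_binary_spec : Claim_equal_format_mask_binary := by
  intro mask length _
  unfold Spec_format_mask_binary
  exact main_eq mask length
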